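-- pv_equiv track=rewrite | github.com/funasshi/AtCoder | abc182e.py | light_count
-- ===== SOURCE A (Python) =====
-- def light_count(jyoutai):
--     h = len(jyoutai)
--     w = len(jyoutai[0])
--     hyou = [[0]*w for i in range(h)]
--     for i, row in enumerate(jyoutai):
--         for j, object in enumerate(row):
--             if j == 0:
--                 if object == 1:
--                     hyou[i][j] = 1
--             else:
--                 if object == 1:
--                     hyou[i][j] = 1
--                 elif object == -1:
--                     hyou[i][j] = 0
--                 else:
--                     hyou[i][j] = hyou[i][j-1]
--     return hyou
-- ===== SOURCE B (Python) =====
-- def light_count(jyoutai):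
--     w = len(jyoutai[0])
--     res = []
--     for row in jyoutai:
--         out = [0] * w
--         events = [(j, x) for j, x in enumerate(row) if x == 1 or x == -1]
--         bounds = [j for j, _ in events[1:]] + [len(row)]
--         for (j, x), b in zip(events, bounds):
--             if x == 1:
--                 for t in range(j, b):
--                     out[t] = 1
--         res.append(out)
--     return res
-- ===== Notes on version B (the rewrite author's own statement) =====
-- stated objective: alternative
-- what changed: Replaces A's cell-by-cell state propagation through a pre-zeroed h x w matrix (each cell reading hyou[i][j-1]) by a per-row event list of the 1/-1 positions whose 1-segments are painted into the zero row by interval fills; Pre_ excludes exactly the inputs on which A raises IndexError (the empty grid, and grids with a row longer than the first row except the harmless width-0 singleton non-1 rows, which stay inside).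
import Mathlib
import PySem

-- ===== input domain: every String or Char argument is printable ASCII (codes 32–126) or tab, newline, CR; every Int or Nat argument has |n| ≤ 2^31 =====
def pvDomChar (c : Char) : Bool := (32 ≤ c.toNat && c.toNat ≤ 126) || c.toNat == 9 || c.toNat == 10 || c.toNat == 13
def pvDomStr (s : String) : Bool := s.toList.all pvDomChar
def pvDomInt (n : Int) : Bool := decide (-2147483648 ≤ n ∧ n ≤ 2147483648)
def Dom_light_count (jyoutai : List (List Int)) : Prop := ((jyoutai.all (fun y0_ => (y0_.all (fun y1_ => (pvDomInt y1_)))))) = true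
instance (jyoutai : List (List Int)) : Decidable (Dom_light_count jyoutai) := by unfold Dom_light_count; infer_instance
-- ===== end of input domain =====

-- B replaces A's cell-by-cell state propagation through a pre-zeroed h×w matrix by a
-- per-row event list (positions of 1/-1) whose 1-segments are filled by interval writes
-- (alternative decomposition, same asymptotic cost).

-- ===== PORT A =====
-- hyou[i][j] = v  (the nested list assignment)
def pvSetCell (hyou : List (List Int)) (i j : Int) (v : Int) : List (List Int) :=
  hyou.set i.toNat ((hyou.getD i.toNat []).set j.toNat v)

-- body of "for j, object in enumerate(row)" at outer index i
def pvInner (i : Int) (hyou : List (List Int)) (jObj : Int × Int) : List (List Int) :=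
  let j := jObj.1
  let object := jObj.2
  if j = 0 then
    if object = 1 then pvSetCell hyou i j 1 else hyou
  else
    if object = 1 then pvSetCell hyou i j 1
    else if object = -1 then pvSetCell hyou i j 0
    else pvSetCell hyou i j ((hyou.getD i.toNat []).getD (j - 1).toNat 0)

-- body of "for i, row in enumerate(jyoutai)"
def pvOuter (hyou : List (List Int)) (iRow : Int × List Int) : List (List Int) :=
  (PySem.List.enumerate iRow.2 0).foldl (pvInner iRow.1) hyou

def light_count (jyoutai : List (List Int)) : List (List Int) :=
  let h := jyoutai.length
  let w := (jyoutai.headD []).length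
  let hyou := List.replicate h (List.replicate w (0 : Int))
  (PySem.List.enumerate jyoutai 0).foldl pvOuter hyou

-- ===== PORT B =====
-- "for t in range(j, b): out[t] = 1"
def pvFillSeg (out : List Int) (a b : Int) : List Int :=
  (PySem.List.pyRange a b 1).foldl (fun o t => o.set t.toNat 1) out

-- "[(j, x) for j, x in enumerate(row) if x == 1 or x == -1]"
def pvEvents (row : List Int) : List (Int × Int) :=
  (PySem.List.enumerate row 0).filter (fun p => p.2 == 1 || p.2 == -1)

-- one row: zero row of width w, then for each event (j,x) with its bound b, fill [j,b) with 1 if x == 1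
def pvFillRow (w : Nat) (row : List Int) : List Int :=
  let events := pvEvents row
  let bounds := (events.drop 1).map (·.1) ++ [(row.length : Int)]
  (events.zip bounds).foldl
    (fun out p => if p.1.2 = 1 then pvFillSeg out p.1.1 p.2 else out)
    (List.replicate w 0)

def light_count_alt (jyoutai : List (List Int)) : List (List Int) :=
  let w := (jyoutai.headD []).length
  jyoutai.foldl (fun res row => res ++ [pvFillRow w row]) []

-- ===== PRECONDITION & SPEC =====
-- Pre_ excludes exactly the inputs on which A raises IndexError: the empty grid (jyoutai[0]),
-- and grids where some row is longer than the first row — except the harmless width-0 case of a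
-- singleton row whose element is not 1, where A performs no write and returns; that case stays inside.
def Pre_light_count (jyoutai : List (List Int)) : Prop :=
  jyoutai ≠ [] ∧ ∀ r ∈ jyoutai,
    r.length ≤ (jyoutai.headD []).length ∨
    ((jyoutai.headD []).length = 0 ∧ r.length = 1 ∧ r.headD 0 ≠ 1)
instance (jyoutai : List (List Int)) : Decidable (Pre_light_count jyoutai) := by
  unfold Pre_light_count; infer_instance
def pvWitness_light_count : List (List Int) := [[1, 0], [0, -1]]

def Spec_light_count (jyoutai : List (List Int)) (out : List (List Int)) : Prop :=
  out = light_count_alt jyoutai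
instance (jyoutai : List (List Int)) (out : List (List Int)) : Decidable (Spec_light_count jyoutai out) := by
  unfold Spec_light_count; infer_instance

-- ===== CLAIM (what is proved, stated in full; the proofs are below) =====
def Claim_equal_light_count : Prop := ∀ (jyoutai : List (List Int)), Dom_light_count jyoutai → Pre_light_count jyoutai → Spec_light_count jyoutai (light_count jyoutai)

-- ===== LEMMAS AND PROOFS =====

-- the common characterization of one output row
def pvSrec (s : Int) : List Int → List Int
  | [] => []
  | x :: xs =>
      let s' := if x = 1 then 1 else if x = -1 then 0 else s
      s' :: pvSrec s' xs

def pvRowOut (w : Nat) (r : List Int) : List Int :=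
  if r.length ≤ w then pvSrec 0 r ++ List.replicate (w - r.length) 0 else []

-- ---------- A side ----------

-- row-local form of the inner loop body
def pvRowStep (cur : List Int) (jObj : Int × Int) : List Int :=
  let j := jObj.1
  let object := jObj.2
  if j = 0 then
    if object = 1 then cur.set 0 1 else cur
  else
    cur.set j.toNat
      (if object = 1 then 1 else if object = -1 then 0 else cur.getD (j - 1).toNat 0)

theorem getD_set_self (hyou : List (List Int)) (n : Nat) (cur : List Int) (h : n < hyou.length) :
    (hyou.set n cur).getD n [] = cur := by
  simp [List.getD, h]

theorem pvInner_step (i : Int) (cur : List Int) (hyou : List (List Int))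
    (h : i.toNat < hyou.length) (p : Int × Int) :
    pvInner i (hyou.set i.toNat cur) p = hyou.set i.toNat (pvRowStep cur p) := by
  obtain ⟨j, x⟩ := p
  simp only [pvInner, pvRowStep, pvSetCell, getD_set_self hyou i.toNat cur h, List.set_set]
  split_ifs <;> subst_vars <;> rfl

theorem pvInner_extract (i : Int) (pairs : List (Int × Int)) :
    ∀ (cur : List Int) (hyou : List (List Int)), i.toNat < hyou.length →
    pairs.foldl (pvInner i) (hyou.set i.toNat cur)
      = hyou.set i.toNat (pairs.foldl pvRowStep cur) := by
  induction pairs with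
  | nil => intro cur hyou h; simp
  | cons p ps ih =>
      intro cur hyou h
      simp only [List.foldl_cons, pvInner_step i cur hyou h p]
      exact ih _ hyou h

theorem set_append_cons {α : Type} (done : List α) (a : α) (t : List α) (v : α) :
    (done ++ a :: t).set done.length v = done ++ v :: t := by
  induction done with
  | nil => simp
  | cons b bs ih => simp [ih]

theorem set_map_append_cons {α β : Type} (done : List α) (g : α → β) (a : β)
    (t : List β) (v : β) :
    ((done.map g) ++ a :: t).set done.length v = done.map g ++ v :: t := by
  have h := set_append_cons (done.map g) a t v
  rwa [List.length_map] at h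

theorem getD_append_getLast (done rest : List Int) (s : Int) (h : done.getLast? = some s) :
    (done ++ rest).getD (done.length - 1) 0 = s := by
  have hne : done ≠ [] := by rintro rfl; simp at h
  have hlt : done.length - 1 < done.length := by
    have := List.length_pos_of_ne_nil hne; omega
  rw [List.getLast?_eq_getElem?] at h
  simp only [List.getD, List.getElem?_append_left hlt]
  simp [h]

theorem pvRow_inv (l : List Int) : ∀ (done : List Int) (s : Int) (pad : Nat),
    done ≠ [] → done.getLast? = some s → l.length ≤ pad →
    (PySem.List.enumerate l (done.length : Int)).foldl pvRowStep (done ++ List.replicate pad 0)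
      = done ++ pvSrec s l ++ List.replicate (pad - l.length) 0 := by
  induction l with
  | nil => intro done s pad _ _ _; simp [PySem.List.enumerate_nil, pvSrec]
  | cons x xs ih =>
      intro done s pad hne hlast hle
      have hdpos : 0 < done.length := List.length_pos_of_ne_nil hne
      have hpad : pad = (pad - 1) + 1 := by simp at hle; omega
      rw [PySem.List.enumerate_cons, List.foldl_cons]
      have hj0 : ((done.length : Int) = 0) = False := by
        simp; omega
      set v : Int := if x = 1 then 1 else if x = -1 then 0 else s with hv
      have hstep : pvRowStep (done ++ List.replicate pad 0) ((done.length : Int), x)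
          = (done ++ [v]) ++ List.replicate (pad - 1) 0 := by
        rw [hpad, List.replicate_succ]
        simp only [pvRowStep, hj0, if_false]
        have htn : ((done.length : Int)).toNat = done.length := by simp
        have htn1 : ((done.length : Int) - 1).toNat = done.length - 1 := by omega
        rw [htn, htn1, set_append_cons]
        rw [getD_append_getLast done _ s hlast]
        simp [hv]
      rw [hstep]
      have hlen' : ((done ++ [v]).length : Int) = (done.length : Int) + 1 := by
        simp
      have := ih (done ++ [v]) v (pad - 1) (by simp)
        (by simp) (by simp at hle ⊢; omega)
      rw [hlen'] at this
      rw [this]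
      simp only [pvSrec, ← hv]
      simp at hle
      have : pad - 1 - xs.length = pad - (xs.length + 1) := by omega
      simp [this]

theorem pvRow_full (row : List Int) (w : Nat) (hle : row.length ≤ w) :
    (PySem.List.enumerate row 0).foldl pvRowStep (List.replicate w 0)
      = pvSrec 0 row ++ List.replicate (w - row.length) 0 := by
  cases row with
  | nil => simp [PySem.List.enumerate_nil, pvSrec]
  | cons x xs =>
      have hw : w = (w - 1) + 1 := by simp at hle; omega
      rw [PySem.List.enumerate_cons, List.foldl_cons]
      set s1 : Int := if x = 1 then 1 else if x = -1 then 0 else 0 with hs1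
      have hstep : pvRowStep (List.replicate w 0) ((0 : Int), x)
          = [s1] ++ List.replicate (w - 1) 0 := by
        rw [hw, List.replicate_succ]
        simp only [pvRowStep, if_true]
        by_cases h1 : x = 1
        · simp [h1, hs1]
        · by_cases h2 : x = -1 <;> simp [h1, h2, hs1]
      rw [hstep]
      have hinv := pvRow_inv xs [s1] s1 (w - 1) (by simp) (by simp)
        (by simp at hle ⊢; omega)
      have e1 : ((([s1] : List Int)).length : Int) = 0 + 1 := by simp
      rw [e1] at hinv
      rw [hinv]
      simp only [pvSrec, ← hs1]
      simp at hle
      have : w - 1 - xs.length = w - (xs.length + 1) := by omega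
      simp [this]

-- degenerate ragged row: width 0, singleton row — A writes nothing (or out of an empty row)
theorem pvRow_deg (v : Int) :
    (PySem.List.enumerate [v] 0).foldl pvRowStep (List.replicate 0 0) = [] := by
  rw [PySem.List.enumerate_cons, PySem.List.enumerate_nil]
  simp only [List.foldl_cons, List.foldl_nil, pvRowStep]
  split_ifs <;> rfl

theorem pvRow_out (row : List Int) (w : Nat)
    (h : row.length ≤ w ∨ (w = 0 ∧ row.length = 1 ∧ row.headD 0 ≠ 1)) :
    (PySem.List.enumerate row 0).foldl pvRowStep (List.replicate w 0) = pvRowOut w row := by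
  rcases h with h | ⟨hw, hl, _⟩
  · rw [pvRow_full row w h, pvRowOut, if_pos h]
  · subst hw
    match row, hl with
    | [v], _ =>
      rw [pvRow_deg, pvRowOut]
      simp

theorem pvOuter_inv (w : Nat) (rows : List (List Int)) :
    ∀ (done : List (List Int)),
    (∀ r ∈ rows, r.length ≤ w ∨ (w = 0 ∧ r.length = 1 ∧ r.headD 0 ≠ 1)) →
    (PySem.List.enumerate rows (done.length : Int)).foldl pvOuter
        (done.map (pvRowOut w) ++ List.replicate rows.length (List.replicate w 0))
      = (done ++ rows).map (pvRowOut w) := by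
  induction rows with
  | nil => intro done _; simp [PySem.List.enumerate_nil]
  | cons row rest ih =>
      intro done hall
      rw [PySem.List.enumerate_cons, List.foldl_cons]
      set hyou := done.map (pvRowOut w) ++ List.replicate (row :: rest).length (List.replicate w (0 : Int)) with hhyou
      have hset : hyou = hyou.set done.length (List.replicate w 0) := by
        rw [hhyou]
        simp only [List.length_cons, List.replicate_succ]
        rw [set_map_append_cons]
      have htn : ((done.length : Int)).toNat = done.length := by simp
      have hlt' : ((done.length : Int)).toNat < hyou.length := by
        rw [htn, hhyou]; simp
      have hx := pvInner_extract ((done.length : Int)) (PySem.List.enumerate row 0)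
        (List.replicate w 0) hyou hlt'
      rw [htn] at hx
      have hstep : pvOuter hyou ((done.length : Int), row)
          = hyou.set done.length (pvRowOut w row) := by
        simp only [pvOuter]
        conv_lhs => rw [hset]
        rw [hx, pvRow_out row w (hall row (by simp))]
      rw [hstep]
      have hset2 : hyou.set done.length (pvRowOut w row)
          = (done ++ [row]).map (pvRowOut w) ++ List.replicate rest.length (List.replicate w 0) := by
        rw [hhyou]
        simp only [List.length_cons, List.replicate_succ]
        rw [set_map_append_cons]
        simp
      rw [hset2]
      have hlen : ((done.length : Int)) + 1 = (((done ++ [row]).length : Nat) : Int) := by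
        simp
      rw [hlen]
      rw [ih (done ++ [row]) (fun r hr => hall r (by simp [hr]))]
      simp

theorem light_count_char (jyoutai : List (List Int))
    (h : ∀ r ∈ jyoutai, r.length ≤ (jyoutai.headD []).length ∨
      ((jyoutai.headD []).length = 0 ∧ r.length = 1 ∧ r.headD 0 ≠ 1)) :
    light_count jyoutai = jyoutai.map (pvRowOut (jyoutai.headD []).length) := by
  have := pvOuter_inv (jyoutai.headD []).length jyoutai [] h
  simpa [light_count] using this

-- ---------- B side ----------

-- events of row, enumerated from start index n
def pvEventsFrom (n : Int) (row : List Int) : List (Int × Int) :=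
  (PySem.List.enumerate row n).filter (fun p => p.2 == 1 || p.2 == -1)

-- the value pattern determined by an event list: constant v up to the next event, then recurse
def pvRecon (v n L : Int) : List (Int × Int) → List Int
  | [] => List.replicate (L - n).toNat v
  | (j, x) :: es => List.replicate (j - n).toNat v ++ pvRecon (if x = 1 then 1 else 0) j L es

theorem eventsFrom_nil (n : Int) : pvEventsFrom n [] = [] := by
  simp [pvEventsFrom, PySem.List.enumerate_nil]

theorem eventsFrom_cons (n : Int) (x : Int) (xs : List Int) :
    pvEventsFrom n (x :: xs) =
      (if x = 1 ∨ x = -1 then [((n : Int), x)] else []) ++ pvEventsFrom (n + 1) xs := by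
  simp only [pvEventsFrom, PySem.List.enumerate_cons, List.filter_cons]
  by_cases h1 : x = 1
  · simp [h1]
  · by_cases h2 : x = -1 <;> simp [h1, h2]

theorem eventsFrom_bounds (row : List Int) : ∀ (n : Int), ∀ p ∈ pvEventsFrom n row,
    n ≤ p.1 ∧ p.1 < n + row.length := by
  induction row with
  | nil => intro n p hp; rw [eventsFrom_nil] at hp; simp at hp
  | cons x xs ih =>
      intro n p hp
      rw [eventsFrom_cons] at hp
      rcases List.mem_append.1 hp with hp | hp
      · split_ifs at hp with h
        · simp at hp; subst hp; simp
        · simp at hp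
      · obtain ⟨h1, h2⟩ := ih (n + 1) p hp
        simp only [List.length_cons]
        constructor
        · omega
        · push_cast at h2 ⊢; omega

-- srec is pvRecon of the event list
theorem recon_shift (es : List (Int × Int)) (v n L : Int)
    (hmem : ∀ p ∈ es, n + 1 ≤ p.1) (hL : n + 1 ≤ L) :
    pvRecon v n L es = v :: pvRecon v (n + 1) L es := by
  cases es with
  | nil =>
      simp only [pvRecon]
      have h1 : (L - n).toNat = (L - (n + 1)).toNat + 1 := by omega
      rw [h1, List.replicate_succ]
  | cons e es' =>
      obtain ⟨j, x⟩ := e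
      have hj : n + 1 ≤ j := hmem (j, x) (by simp)
      simp only [pvRecon]
      have h1 : (j - n).toNat = (j - (n + 1)).toNat + 1 := by omega
      rw [h1, List.replicate_succ]
      simp

theorem srec_eq_recon (row : List Int) : ∀ (n v : Int),
    pvRecon v n (n + row.length) (pvEventsFrom n row) = pvSrec v row := by
  induction row with
  | nil => intro n v; rw [eventsFrom_nil]; simp [pvRecon, pvSrec]
  | cons x xs ih =>
      intro n v
      have hL : (n + ((x :: xs).length : Int)) = (n + 1) + (xs.length : Int) := by simp; omega
      rw [eventsFrom_cons, hL]
      by_cases hx : x = 1 ∨ x = -1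
      · rw [if_pos hx]
        set v' : Int := if x = 1 then 1 else 0 with hv'
        have hsh : pvRecon v' n ((n + 1) + (xs.length : Int)) (pvEventsFrom (n + 1) xs)
            = v' :: pvRecon v' (n + 1) ((n + 1) + (xs.length : Int)) (pvEventsFrom (n + 1) xs) := by
          apply recon_shift
          · intro p hp; exact (eventsFrom_bounds xs (n + 1) p hp).1
          · omega
        simp only [List.cons_append, List.nil_append, pvRecon]
        rw [show (n - n).toNat = 0 from by omega]
        rw [List.replicate_zero, List.nil_append, ← hv', hsh, ih (n + 1) v']
        have : pvSrec v (x :: xs) = v' :: pvSrec v' xs := by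
          simp only [pvSrec]
          rcases hx with h | h <;> simp [h, hv']
        rw [this]
      · rw [if_neg hx, List.nil_append]
        rw [not_or] at hx
        have hsh : pvRecon v n ((n + 1) + (xs.length : Int)) (pvEventsFrom (n + 1) xs)
            = v :: pvRecon v (n + 1) ((n + 1) + (xs.length : Int)) (pvEventsFrom (n + 1) xs) := by
          apply recon_shift
          · intro p hp; exact (eventsFrom_bounds xs (n + 1) p hp).1
          · omega
        rw [hsh, ih (n + 1) v]
        simp only [pvSrec]
        simp [hx.1, hx.2]

-- interval fill on a zero block
theorem fillSeg_zeros (m : Nat) : ∀ (P S : List Int) (a : Int) (c : Int),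
    0 ≤ a → P.length = a.toNat →
    pvFillSeg (P ++ List.replicate m c ++ S) a (a + m) = P ++ List.replicate m 1 ++ S := by
  induction m with
  | zero =>
      intro P S a c _ _
      simp [pvFillSeg]
  | succ m' ih =>
      intro P S a c ha hP
      have hlt : a < a + ((m' + 1 : Nat) : Int) := by push_cast; omega
      simp only [pvFillSeg] at *
      rw [PySem.List.pyRange_one_cons hlt, List.foldl_cons]
      have hset : (P ++ List.replicate (m' + 1) c ++ S).set a.toNat 1
          = (P ++ [1]) ++ List.replicate m' c ++ S := by
        rw [List.replicate_succ, ← hP]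
        have := set_append_cons P (c : Int) (List.replicate m' c ++ S) 1
        simp only [List.append_assoc, List.cons_append] at this ⊢
        exact this
      rw [hset]
      have hend : a + ((m' + 1 : Nat) : Int) = (a + 1) + (m' : Nat) := by push_cast; omega
      rw [hend]
      have := ih (P ++ [1]) S (a + 1) c (by omega) (by simp [hP]; omega)
      simp only [List.append_assoc, List.cons_append, List.nil_append] at this ⊢
      exact this

-- recon with explicit first bound
theorem recon_head (es : List (Int × Int)) (v j L b : Int)
    (hb : (es = [] ∧ b = L) ∨ ∃ e es', es = e :: es' ∧ b = e.1) :
    pvRecon v j L es = List.replicate (b - j).toNat v ++ pvRecon 0 b L es := by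
  rcases hb with ⟨h1, h2⟩ | ⟨⟨j2, x2⟩, es', h1, h2⟩
  · subst h1; subst h2; simp [pvRecon]
  · subst h1; subst h2; simp [pvRecon]

-- the fold over (event, bound) pairs realizes pvRecon
theorem fill_fold (events : List (Int × Int)) : ∀ (n L : Int) (w : Nat) (pref : List Int),
    0 ≤ n → n ≤ L → L ≤ (w : Int) → pref.length = n.toNat →
    (∀ p ∈ events, n ≤ p.1 ∧ p.1 < L) →
    List.Pairwise (fun a b => a.1 < b.1) events →
    (events.zip ((events.drop 1).map (·.1) ++ [L])).foldl
        (fun out p => if p.1.2 = 1 then pvFillSeg out p.1.1 p.2 else out)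
        (pref ++ List.replicate ((w : Int) - n).toNat 0)
      = pref ++ pvRecon 0 n L events ++ List.replicate ((w : Int) - L).toNat 0 := by
  induction events with
  | nil =>
      intro n L w pref hn hnL hLw hP _ _
      simp only [List.zip_nil_left, List.foldl_nil, pvRecon]
      rw [List.append_assoc, ← List.replicate_add]
      congr 2
      omega
  | cons e es ih =>
      intro n L w pref hn hnL hLw hP hmem hpw
      obtain ⟨j, x⟩ := e
      have hj := hmem (j, x) (by simp)
      obtain ⟨b, hbd⟩ : ∃ b : Int, (es = [] ∧ b = L) ∨ ∃ e' es', es = e' :: es' ∧ b = e'.1 := by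
        cases es with
        | nil => exact ⟨L, Or.inl ⟨rfl, rfl⟩⟩
        | cons e' es' => exact ⟨e'.1, Or.inr ⟨e', es', rfl, rfl⟩⟩
      have hjb : j < b := by
        rcases hbd with ⟨h1, h2⟩ | ⟨e', es', h1, h2⟩ <;> subst h1 <;> subst h2
        · omega
        · exact (List.pairwise_cons.1 hpw).1 e' (by simp)
      have hbL : b ≤ L := by
        rcases hbd with ⟨h1, h2⟩ | ⟨e', es', h1, h2⟩ <;> subst h1 <;> subst h2
        · exact le_rfl
        · exact le_of_lt (hmem e' (by simp)).2
      have hzip : ((j, x) :: es).zip ((((j, x) :: es).drop 1).map (·.1) ++ [L])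
          = ((j, x), b) :: es.zip ((es.drop 1).map (·.1) ++ [L]) := by
        rcases hbd with ⟨h1, h2⟩ | ⟨e', es', h1, h2⟩ <;> subst h1 <;> subst h2 <;> simp
      have hmem' : ∀ p ∈ es, b ≤ p.1 ∧ p.1 < L := by
        intro p hp
        refine ⟨?_, (hmem p (by simp [hp])).2⟩
        rcases hbd with ⟨h1, h2⟩ | ⟨e', es', h1, h2⟩ <;> subst h1 <;> subst h2
        · simp at hp
        · rcases List.mem_cons.1 hp with hp | hp
          · subst hp; exact le_rfl
          · have h1 := (List.pairwise_cons.1 (List.pairwise_cons.1 hpw).2).1 p hp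
            have h2 := (List.pairwise_cons.1 hpw).1 e' (by simp)
            omega
      have hrechead : ∀ v0 : Int, pvRecon v0 j L es = List.replicate (b - j).toNat v0 ++ pvRecon 0 b L es :=
        fun v0 => recon_head es v0 j L b hbd
      clear hbd
      rw [hzip, List.foldl_cons]
      -- split the zero block at j and b
      have hsplit : pref ++ List.replicate ((w : Int) - n).toNat 0
          = (pref ++ List.replicate (j - n).toNat 0) ++ List.replicate (b - j).toNat 0
              ++ List.replicate ((w : Int) - b).toNat 0 := by
        simp only [List.append_assoc, ← List.replicate_add]
        congr 2
        omega
      set v' : Int := if x = 1 then 1 else 0 with hv'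
      have hstep : (if x = 1 then
            pvFillSeg (pref ++ List.replicate ((w : Int) - n).toNat 0) j b
          else pref ++ List.replicate ((w : Int) - n).toNat 0)
          = ((pref ++ List.replicate (j - n).toNat 0) ++ List.replicate (b - j).toNat v')
              ++ List.replicate ((w : Int) - b).toNat 0 := by
        by_cases hx1 : x = 1
        · rw [if_pos hx1, hsplit]
          have hbj : b = j + ((b - j).toNat : Nat) := by omega
          have := fillSeg_zeros (b - j).toNat (pref ++ List.replicate (j - n).toNat 0)
            (List.replicate ((w : Int) - b).toNat 0) j 0 (by omega)
            (by simp [hP]; omega)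
          rw [← hbj] at this
          simp only [List.append_assoc] at this ⊢
          rw [this]
          simp [hv', hx1]
        · rw [if_neg hx1, hsplit]
          simp [hv', hx1, List.append_assoc]
      rw [hstep]
      have hPlen : ((pref ++ List.replicate (j - n).toNat 0) ++ List.replicate (b - j).toNat v').length
          = b.toNat := by simp [hP]; omega
      have := ih b L w ((pref ++ List.replicate (j - n).toNat 0) ++ List.replicate (b - j).toNat v')
        (by omega) hbL hLw hPlen hmem' (List.pairwise_cons.1 hpw).2
      rw [this]
      have hrec : pvRecon 0 n L ((j, x) :: es)
          = List.replicate (j - n).toNat 0 ++ (List.replicate (b - j).toNat v' ++ pvRecon 0 b L es) := by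
        simp only [pvRecon, ← hv']
        rw [hrechead v']
      rw [hrec]
      simp [List.append_assoc]

theorem events_pairwise (row : List Int) (n : Int) :
    List.Pairwise (fun a b => a.1 < b.1) (pvEventsFrom n row) :=
  List.Pairwise.filter _ (PySem.List.pairwise_lt_enumerate row n)

theorem fillSeg_nil (a b : Int) : pvFillSeg [] a b = [] := by
  simp only [pvFillSeg]
  generalize PySem.List.pyRange a b 1 = l
  induction l with
  | nil => rfl
  | cons t ts ih => simpa using ih

theorem fillRow_deg (v : Int) : pvFillRow 0 [v] = [] := by
  simp only [pvFillRow]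
  generalize (pvEvents [v]).zip _ = l
  induction l with
  | nil => rfl
  | cons p ps ih =>
      simp only [List.foldl_cons, List.replicate_zero] at *
      split_ifs <;> simp [fillSeg_nil, ih]

theorem fillRow_out (row : List Int) (w : Nat)
    (h : row.length ≤ w ∨ (w = 0 ∧ row.length = 1 ∧ row.headD 0 ≠ 1)) :
    pvFillRow w row = pvRowOut w row := by
  rcases h with h | ⟨hw, hl, _⟩
  · have hfold := fill_fold (pvEventsFrom 0 row) 0 (row.length : Int) w []
      le_rfl (by simp) (by exact_mod_cast h) (by simp)
      (by intro p hp; simpa using eventsFrom_bounds row 0 p hp)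
      (events_pairwise row 0)
    have hrec := srec_eq_recon row 0 0
    rw [show ((0 : Int) + (row.length : Int)) = (row.length : Int) from by omega] at hrec
    simp only [pvFillRow, pvEvents]
    have hEv : (PySem.List.enumerate row 0).filter (fun p => p.2 == 1 || p.2 == -1)
        = pvEventsFrom 0 row := rfl
    have hz : (List.replicate w (0 : Int)) = [] ++ List.replicate (((w : Int)) - 0).toNat 0 := by simp
    rw [hEv, hz, hfold, hrec, pvRowOut, if_pos h]
    have hc : ((w : Int) - (row.length : Int)).toNat = w - row.length := by omega
    simp [hc]
  · subst hw
    match row, hl with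
    | [v], _ =>
      rw [fillRow_deg, pvRowOut]
      simp

theorem foldl_append_map (l : List (List Int)) (f : List Int → List Int) :
    ∀ acc, l.foldl (fun res row => res ++ [f row]) acc = acc ++ l.map f := by
  induction l with
  | nil => intro acc; simp
  | cons r rs ih => intro acc; simp [ih]

theorem light_count_alt_char (jyoutai : List (List Int))
    (h : ∀ r ∈ jyoutai, r.length ≤ (jyoutai.headD []).length ∨
      ((jyoutai.headD []).length = 0 ∧ r.length = 1 ∧ r.headD 0 ≠ 1)) :
    light_count_alt jyoutai = jyoutai.map (pvRowOut (jyoutai.headD []).length) := by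
  simp only [light_count_alt]
  rw [foldl_append_map jyoutai (pvFillRow (jyoutai.headD []).length) []]
  simp only [List.nil_append]
  exact List.map_congr_left (fun r hr => fillRow_out r _ (h r hr))

-- ===== VERDICT (by name: the statement is the Claim_ definition above) =====
theorem light_count_spec : Claim_equal_light_count := by
  intro jyoutai _ hpre
  unfold Spec_light_count
  rw [light_count_char jyoutai hpre.2, light_count_alt_char jyoutai hpre.2]
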